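-- pv_equiv track=rewrite | github.com/nordeim/Medical-AI-Assistant | serving/api/endpoints/validation.py | _calculate_phi_risk_level
-- ===== SOURCE A (Python) =====
-- from typing import Dict, Any, List, Optional, Union, Literal
--
-- def _calculate_phi_risk_level(phi_types: List[str], phi_instances: List[Dict[str, Any]]) -> str:
--     """Calculate PHI risk level"""
--
--     high_risk_types = {"social_security_numbers", "biometric_identifiers", "photos"}
--     medium_risk_types = {"names", "dates", "telephone_numbers", "email_addresses"}
--
--     if any(phi_type in high_risk_types for phi_type in phi_types):
--         return "high"
--     elif any(phi_type in medium_risk_types for phi_type in phi_types):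
--         return "medium"
--     elif phi_types:
--         return "low"
--     else:
--         return "none"
-- ===== SOURCE B (Python) =====
-- def _calculate_phi_risk_level(phi_types, phi_instances):
--     """Calculate PHI risk level"""
--     high_risk_types = {"social_security_numbers", "biometric_identifiers", "photos"}
--     medium_risk_types = {"names", "dates", "telephone_numbers", "email_addresses"}
--     rank = 0
--     for t in phi_types:
--         if t in high_risk_types:
--             rank = 3
--             break
--         rank = max(rank, 2 if t in medium_risk_types else 1)
--     return ("none", "low", "medium", "high")[rank]
-- ===== Notes on version B (the rewrite author's own statement) =====
-- stated objective: alternative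
-- what changed: Replaces the three separate any-scans and the if/elif chain by a single pass maintaining a numeric severity rank (break on high), translated to a string at the end via a tuple lookup.
import Mathlib
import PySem

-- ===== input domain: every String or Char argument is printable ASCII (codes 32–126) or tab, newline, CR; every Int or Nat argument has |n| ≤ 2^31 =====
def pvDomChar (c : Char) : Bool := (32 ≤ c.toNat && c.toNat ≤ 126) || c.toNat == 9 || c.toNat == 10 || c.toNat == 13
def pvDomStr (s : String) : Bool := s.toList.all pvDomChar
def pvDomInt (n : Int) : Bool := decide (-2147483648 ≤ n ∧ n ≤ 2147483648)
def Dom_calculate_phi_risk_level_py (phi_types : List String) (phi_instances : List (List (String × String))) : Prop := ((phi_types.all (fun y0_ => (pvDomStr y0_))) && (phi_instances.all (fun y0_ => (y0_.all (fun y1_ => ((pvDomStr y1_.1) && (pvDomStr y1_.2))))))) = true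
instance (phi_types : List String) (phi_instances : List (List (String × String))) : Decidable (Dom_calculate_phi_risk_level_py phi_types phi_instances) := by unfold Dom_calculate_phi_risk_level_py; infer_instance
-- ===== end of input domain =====

-- B replaces the three any-scans and if/elif chain by one pass keeping a numeric severity rank (alternative decomposition, same cost).
-- ===== PORT A =====
def pvHigh (t : String) : Bool := t == "social_security_numbers" || t == "biometric_identifiers" || t == "photos"
def pvMed (t : String) : Bool := t == "names" || t == "dates" || t == "telephone_numbers" || t == "email_addresses"

def calculate_phi_risk_level_py (phi_types : List String) (phi_instances : List (List (String × String))) : String :=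
  if phi_types.any (fun t => pvHigh t) then "high"
  else if phi_types.any (fun t => pvMed t) then "medium"
  else if phi_types ≠ [] then "low"
  else "none"

-- ===== PORT B =====
-- single pass with early break on a high-risk type, maintaining the running rank
def pvRankLoop : List String → Nat → Nat
  | [], r => r
  | t :: ts, r => if pvHigh t then 3 else pvRankLoop ts (max r (if pvMed t then 2 else 1))

def calculate_phi_risk_level_py_alt (phi_types : List String) (phi_instances : List (List (String × String))) : String :=
  match pvRankLoop phi_types 0 with
  | 3 => "high" | 2 => "medium" | 1 => "low" | _ => "none"

-- ===== PRECONDITION & SPEC =====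
def Spec_calculate_phi_risk_level_py (phi_types : List String) (phi_instances : List (List (String × String))) (out : String) : Prop := out = calculate_phi_risk_level_py_alt phi_types phi_instances
instance (phi_types : List String) (phi_instances : List (List (String × String))) (out : String) : Decidable (Spec_calculate_phi_risk_level_py phi_types phi_instances out) := by unfold Spec_calculate_phi_risk_level_py; infer_instance

-- ===== CLAIM (what is proved, stated in full; the proofs are below) =====
def Claim_equal_calculate_phi_risk_level_py : Prop := ∀ (phi_types : List String) (phi_instances : List (List (String × String))), Dom_calculate_phi_risk_level_py phi_types phi_instances → Spec_calculate_phi_risk_level_py phi_types phi_instances (calculate_phi_risk_level_py phi_types phi_instances)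

-- ===== LEMMAS AND PROOFS =====

-- ===== VERDICT (by name: the statement is the Claim_ definition above) =====
lemma pvRankLoop_spec (ts : List String) (r : Nat) (hr : r ≤ 2) :
    pvRankLoop ts r = if ts.any (fun t => pvHigh t) then 3
      else if ts.any (fun t => pvMed t) then max r 2
      else if ts ≠ [] then max r 1 else r := by
  induction ts generalizing r with
  | nil => simp [pvRankLoop]
  | cons t ts ih =>
    simp only [pvRankLoop, List.any_cons]
    by_cases h1 : pvHigh t
    · simp [h1]
    · by_cases h2 : pvMed t <;>
        · rw [ih _ (by simp [h2]; omega)]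
          simp only [h1, h2, Bool.false_or, Bool.true_or, if_true, if_false,
            Bool.false_eq_true, ne_eq, reduceCtorEq, not_false_eq_true]
          split_ifs <;> omega

theorem calculate_phi_risk_level_py_spec : Claim_equal_calculate_phi_risk_level_py := by
  intro phi_types phi_instances _
  unfold Spec_calculate_phi_risk_level_py calculate_phi_risk_level_py calculate_phi_risk_level_py_alt
  rw [pvRankLoop_spec phi_types 0 (by omega)]
  cases phi_types <;> split_ifs <;> simp_all
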